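-- pv_equiv track=rewrite | github.com/oh2468/daily-programmer | challenges/371_NQueensValidator.py | qfix
-- ===== SOURCE A (Python) =====
-- def qcheck(queens):
--     if len(set(queens)) != len(queens): return False
--
--     n = len(queens)
--     get_pos = lambda q, c, r: (c * q) + r if 0 <= c < q and 0 <= r < q else -1
--     q_pos = {get_pos(n, i, q - 1) for i, q in enumerate(queens)}
--
--     for c, q in enumerate(queens):
--         q -= 1
--         for r in range(n):
--             ru = q - r - 1
--             rd = q + r + 1
--             cl = c - r - 1
--             cr = c + r + 1
--             if get_pos(n, cl, ru) in q_pos: return False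
--             if get_pos(n, cl, rd) in q_pos: return False
--             if get_pos(n, cr, ru) in q_pos: return False
--             if get_pos(n, cr, rd) in q_pos: return False
--     return True
--
-- def qfix(queens):
--     if qcheck(queens):
--         return queens
--
--     for i, q1 in enumerate(queens):
--         for j in range(i + 1, len(queens)):
--             q2 = queens[j]
--             queens[i] = q2
--             queens[j] = q1
--             if qcheck(queens):
--                 return queens
--             queens[i] = q1
--             queens[j] = q2
--
--     return []
-- ===== SOURCE B (Python) =====
-- def qfix(queens):
--     # Equivalence is about the return value: A swaps entries of `queens` in
--     # place while searching; B works on copies and never mutates the argument.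
--     def qcheck(qs):
--         n = len(qs)
--         if len(set(qs)) != n:
--             return False
--         if any(not (1 <= q <= n) for q in qs):
--             return False
--         return all(abs(qs[i] - qs[j]) != j - i
--                    for i in range(n) for j in range(i + 1, n))
--
--     if qcheck(queens):
--         return queens
--     n = len(queens)
--     for i in range(n):
--         for j in range(i + 1, n):
--             cand = queens[:]
--             cand[i], cand[j] = cand[j], cand[i]
--             if qcheck(cand):
--                 return cand
--     return []
-- ===== Notes on version B (the rewrite author's own statement) =====
-- stated objective: simpler
-- what changed: The validator no longer builds a set of encoded cell ids and scans four diagonal rays of length n per queen; it rejects duplicate rows, rejects rows off the board (1<=q<=n), and then does the standard pairwise diagonal test abs(q_i-q_j)==j-i over all pairs; the swap search works on copies instead of mutating the input.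
import Mathlib
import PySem

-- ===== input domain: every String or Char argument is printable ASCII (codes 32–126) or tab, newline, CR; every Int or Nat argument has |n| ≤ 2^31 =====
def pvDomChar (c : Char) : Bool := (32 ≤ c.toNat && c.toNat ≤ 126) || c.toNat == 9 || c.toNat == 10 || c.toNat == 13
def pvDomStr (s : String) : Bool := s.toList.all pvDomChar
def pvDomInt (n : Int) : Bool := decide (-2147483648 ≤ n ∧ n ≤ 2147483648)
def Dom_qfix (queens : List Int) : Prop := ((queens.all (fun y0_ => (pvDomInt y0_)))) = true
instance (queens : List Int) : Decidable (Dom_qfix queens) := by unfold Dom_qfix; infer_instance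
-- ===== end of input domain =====

-- B replaces A's set-of-encoded-cells + four-diagonal-ray validator by the standard pairwise
-- N-queens check (duplicate rows, on-board rows, |q_i - q_j| = j - i); the swap search is kept.
-- A mutates its argument in place while searching; the equivalence proved is about the RETURN value.

-- ===== PORT A =====
def pvGetPos (q c r : Int) : Int :=
  if 0 ≤ c ∧ c < q ∧ 0 ≤ r ∧ r < q then c * q + r else -1

def pvQcheck (queens : List Int) : Bool :=
  if (PySem.Set.ofList queens).length ≠ queens.length then false
  else
    let n : Int := queens.length
    let qpos : PySem.Set Int :=
      PySem.Set.ofList ((PySem.List.enumerate queens).map (fun p => pvGetPos n p.1 (p.2 - 1)))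
    if (PySem.List.enumerate queens).any (fun p =>
        let c := p.1
        let q := p.2 - 1
        (PySem.List.pyRange 0 n 1).any (fun r =>
          let ru := q - r - 1
          let rd := q + r + 1
          let cl := c - r - 1
          let cr := c + r + 1
          PySem.Set.contains qpos (pvGetPos n cl ru) ||
          PySem.Set.contains qpos (pvGetPos n cl rd) ||
          PySem.Set.contains qpos (pvGetPos n cr ru) ||
          PySem.Set.contains qpos (pvGetPos n cr rd)))
    then false else true

-- Python swaps queens[i],queens[j] in place, checks, and restores on failure; the checked list
-- is exactly the swapped copy built here.  j ∈ range(i+1, len) and i from enumerate are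
-- nonnegative in-range indices, so .toNat / getD are exact here.
def qfix (queens : List Int) : List Int :=
  if pvQcheck queens then queens
  else
    match (PySem.List.enumerate queens).findSome? (fun p =>
      (PySem.List.pyRange (p.1 + 1) queens.length 1).findSome? (fun j =>
        let q2 := queens.getD j.toNat 0
        let swapped := (queens.set p.1.toNat q2).set j.toNat p.2
        if pvQcheck swapped then some swapped else none)) with
    | some res => res
    | none => []

-- ===== PORT B =====
def pvOk (qs : List Int) : Bool :=
  let n := qs.length
  if (PySem.Set.ofList qs).length ≠ n then false
  else if qs.any (fun q => !(1 ≤ q && q ≤ (n : Int))) then false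
  else (List.range n).all (fun i =>
         (List.range' (i + 1) (n - (i + 1))).all (fun j =>
           (qs.getD i 0 - qs.getD j 0).natAbs != j - i))

def qfix_alt (queens : List Int) : List Int :=
  if pvOk queens then queens
  else
    let n := queens.length
    match (List.range n).findSome? (fun i =>
      (List.range' (i + 1) (n - (i + 1))).findSome? (fun j =>
        let cand := (queens.set i (queens.getD j 0)).set j (queens.getD i 0)
        if pvOk cand then some cand else none)) with
    | some res => res
    | none => []

-- ===== PRECONDITION & SPEC =====
def Spec_qfix (queens : List Int) (out : List Int) : Prop := out = qfix_alt queens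
instance (queens : List Int) (out : List Int) : Decidable (Spec_qfix queens out) := by unfold Spec_qfix; infer_instance

-- ===== CLAIM (what is proved, stated in full; the proofs are below) =====
def Claim_equal_qfix : Prop := ∀ (queens : List Int), Dom_qfix queens → Spec_qfix queens (qfix queens)

-- ===== LEMMAS AND PROOFS =====

-- the common specification of both validators
def pvGood (qs : List Int) : Prop :=
  qs.Nodup ∧ (∀ q ∈ qs, 1 ≤ q ∧ q ≤ (qs.length : Int)) ∧
    ∀ i j : Nat, i < j → j < qs.length → (qs.getD i 0 - qs.getD j 0).natAbs ≠ j - i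

theorem pv_len_ofList_iff (qs : List Int) :
    (PySem.Set.ofList qs).length = qs.length ↔ qs.Nodup := by
  constructor
  · intro h
    have hfin : (PySem.Set.ofList qs).toFinset = qs.toFinset := by
      ext x; simp [PySem.Set.mem_ofList]
    have hc : (PySem.Set.ofList qs).toFinset.card = (PySem.Set.ofList qs).length :=
      List.toFinset_card_of_nodup (PySem.Set.nodup_ofList qs)
    have hq : qs.toFinset.card = qs.length := by rw [← hfin, hc, h]
    simpa using Multiset.toFinset_card_eq_card_iff_nodup.mp (by simpa using hq)
  · intro h; rw [PySem.Set.ofList_eq_self_of_nodup qs h]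

theorem pv_enc_inj (n a b a' b' : Int) (ha : 0 ≤ a) (han : a < n) (hb : 0 ≤ b) (hbn : b < n)
    (ha' : 0 ≤ a') (han' : a' < n) (hb' : 0 ≤ b') (hbn' : b' < n)
    (h : a * n + b = a' * n + b') : a = a' ∧ b = b' := by
  have hab : a = a' := by
    rcases lt_trichotomy a a' with hlt | heq | hgt
    · nlinarith
    · exact heq
    · nlinarith
  refine ⟨hab, ?_⟩
  rw [hab] at h; linarith

theorem pv_enumerate_eq (qs : List Int) :
    PySem.List.enumerate qs =
      (List.range qs.length).map (fun (k : Nat) => ((k : Int), qs.getD k 0)) := by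
  rw [PySem.List.enumerate_eq_map_pyRange (d := 0), PySem.List.pyRange_one]
  have h : ((PySem.List.len qs : Int) - 0).toNat = qs.length := by
    simp [PySem.List.len_eq]
  rw [h, List.map_map]
  apply List.map_congr_left
  intro k hk
  rw [List.mem_range] at hk
  simp [Function.comp, PySem.List.pyGetD_natCast]

theorem pv_range'_eq (s n : Nat) :
    PySem.List.pyRange ((s : Int)) (((s + n : Nat) : Int)) 1 =
      (List.range' s n).map (fun (j : Nat) => (j : Int)) := by
  rw [PySem.List.pyRange_one, List.range'_eq_map_range, List.map_map]
  have h : (((s + n : Nat) : Int) - (s : Int)).toNat = n := by omega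
  rw [h]
  apply List.map_congr_left
  intro a ha
  simp

theorem pv_findSome?_congr {α β : Type} (l : List α) (f g : α → Option β)
    (h : ∀ a ∈ l, f a = g a) : l.findSome? f = l.findSome? g := by
  induction l with
  | nil => rfl
  | cons x xs ih =>
    simp only [List.findSome?_cons, h x (by simp)]
    cases g x with
    | none => exact ih (fun a ha => h a (by simp [ha]))
    | some b => rfl

theorem pv_ok_iff (qs : List Int) : pvOk qs = true ↔ pvGood qs := by
  unfold pvGood
  simp only [pvOk]
  split_ifs with h1 h2
  · simp only [false_iff]
    rintro ⟨hnodup, -, -⟩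
    exact h1 ((pv_len_ofList_iff qs).mpr hnodup)
  · simp only [false_iff]
    rintro ⟨-, hrange, -⟩
    rcases List.any_eq_true.mp h2 with ⟨q, hq, hbad⟩
    have := hrange q hq
    simp only [Bool.not_eq_eq_eq_not, Bool.not_true, Bool.and_eq_false_iff,
      decide_eq_false_iff_not] at hbad
    rcases hbad with h | h <;> omega
  · constructor
    · intro hall
      have hnodup : qs.Nodup := (pv_len_ofList_iff qs).mp (not_not.mp h1)
      have hrange : ∀ q ∈ qs, 1 ≤ q ∧ q ≤ (qs.length : Int) := by
        intro q hq
        by_contra hcon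
        refine h2 (List.any_eq_true.mpr ⟨q, hq, ?_⟩)
        simp only [Bool.not_eq_eq_eq_not, Bool.not_true, Bool.and_eq_false_iff,
          decide_eq_false_iff_not]
        omega
      refine ⟨hnodup, hrange, ?_⟩
      intro i j hij hj
      have hi : i < qs.length := lt_trans hij hj
      have h3 := List.all_eq_true.mp hall i (List.mem_range.mpr hi)
      have h4 := List.all_eq_true.mp h3 j (List.mem_range'_1.mpr ⟨by omega, by omega⟩)
      simpa using h4
    · rintro ⟨hnodup, hrange, hdiag⟩
      refine List.all_eq_true.mpr ?_
      intro i hi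
      refine List.all_eq_true.mpr ?_
      intro j hj
      rw [List.mem_range] at hi
      rw [List.mem_range'_1] at hj
      have := hdiag i j (by omega) (by omega)
      simpa using this

theorem pv_contains_qpos (qs : List Int) (x : Int) :
    PySem.Set.contains (PySem.Set.ofList
        ((((List.range qs.length).map (fun (k : Nat) => ((k : Int), qs.getD k 0))).map
          (fun p => pvGetPos ((qs.length : Int)) p.1 (p.2 - 1))))) x = true ↔
      ∃ k : Nat, k < qs.length ∧
        pvGetPos ((qs.length : Int)) ((k : Int)) (qs.getD k 0 - 1) = x := by
  rw [PySem.Set.contains_iff, PySem.Set.mem_ofList, List.map_map, List.mem_map]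
  constructor
  · rintro ⟨k, hk, hval⟩
    rw [List.mem_range] at hk
    exact ⟨k, hk, by simpa [Function.comp] using hval⟩
  · rintro ⟨k, hk, hval⟩
    exact ⟨k, List.mem_range.mpr hk, by simpa [Function.comp] using hval⟩

theorem pv_hit (qs : List Int) (hP2 : ∀ q ∈ qs, 1 ≤ q ∧ q ≤ (qs.length : Int))
    (k : Nat) (hk : k < qs.length) (cc cr : Int)
    (hval : pvGetPos ((qs.length : Int)) ((k : Int)) (qs.getD k 0 - 1) =
            pvGetPos ((qs.length : Int)) cc cr) :
    (k : Int) = cc ∧ qs.getD k 0 - 1 = cr := by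
  have hm : qs.getD k 0 ∈ qs := by
    rw [List.getD_eq_getElem _ _ hk]; exact List.getElem_mem hk
  have hq := hP2 _ hm
  have hkn : (k : Int) < (qs.length : Int) := by exact_mod_cast hk
  have hcode : pvGetPos ((qs.length : Int)) ((k : Int)) (qs.getD k 0 - 1)
      = (k : Int) * (qs.length : Int) + (qs.getD k 0 - 1) := by
    unfold pvGetPos
    rw [if_pos]
    exact ⟨by positivity, hkn, by omega, by omega⟩
  by_cases hv : 0 ≤ cc ∧ cc < (qs.length : Int) ∧ 0 ≤ cr ∧ cr < (qs.length : Int)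
  · have hcode2 : pvGetPos ((qs.length : Int)) cc cr = cc * (qs.length : Int) + cr := by
      unfold pvGetPos; rw [if_pos hv]
    rw [hcode, hcode2] at hval
    exact pv_enc_inj ((qs.length : Int)) _ _ _ _ (by positivity) hkn (by omega) (by omega)
      hv.1 hv.2.1 hv.2.2.1 hv.2.2.2 hval
  · exfalso
    have hneg : pvGetPos ((qs.length : Int)) cc cr = -1 := by
      unfold pvGetPos; rw [if_neg hv]
    rw [hcode, hneg] at hval
    have hmul : 0 ≤ (k : Int) * (qs.length : Int) := by positivity
    omega

theorem pv_qcheck_iff (qs : List Int) : pvQcheck qs = true ↔ pvGood qs := by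
  unfold pvGood
  simp only [pvQcheck]
  split_ifs with h1 h2
  · simp only [false_iff]
    rintro ⟨hnodup, -, -⟩
    exact h1 ((pv_len_ofList_iff qs).mpr hnodup)
  · -- the diagonal-ray scan found a hit: pvGood fails
    simp only [false_iff]
    rintro ⟨hnodup, hP2, hP3⟩
    rw [pv_enumerate_eq] at h2
    rcases List.any_eq_true.mp h2 with ⟨p, hp, hcond⟩
    rcases List.mem_map.mp hp with ⟨c, hcm, rfl⟩
    rw [List.mem_range] at hcm
    dsimp only at hcond
    rcases List.any_eq_true.mp hcond with ⟨r, hr, h4⟩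
    rw [PySem.List.mem_pyRange_one] at hr
    simp only [Bool.or_eq_true] at h4
    rcases h4 with ((hA | hB) | hC) | hD
    · rcases (pv_contains_qpos qs _).mp hA with ⟨k, hk, hval⟩
      obtain ⟨hkc, hkr⟩ := pv_hit qs hP2 k hk _ _ hval
      have := hP3 k c (by omega) hcm
      omega
    · rcases (pv_contains_qpos qs _).mp hB with ⟨k, hk, hval⟩
      obtain ⟨hkc, hkr⟩ := pv_hit qs hP2 k hk _ _ hval
      have := hP3 k c (by omega) hcm
      omega
    · rcases (pv_contains_qpos qs _).mp hC with ⟨k, hk, hval⟩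
      obtain ⟨hkc, hkr⟩ := pv_hit qs hP2 k hk _ _ hval
      have := hP3 c k (by omega) hk
      omega
    · rcases (pv_contains_qpos qs _).mp hD with ⟨k, hk, hval⟩
      obtain ⟨hkc, hkr⟩ := pv_hit qs hP2 k hk _ _ hval
      have := hP3 c k (by omega) hk
      omega
  · -- no hit found: the board is good
    simp only [true_iff]
    rw [pv_enumerate_eq] at h2
    have hnodup : qs.Nodup := (pv_len_ofList_iff qs).mp (not_not.mp h1)
    have hP2 : ∀ q ∈ qs, 1 ≤ q ∧ q ≤ (qs.length : Int) := by
      by_contra hcon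
      push_neg at hcon
      obtain ⟨q, hq, hbad⟩ := hcon
      obtain ⟨k, hk, rfl⟩ := List.mem_iff_getElem.mp hq
      have hg : qs.getD k 0 = qs[k] := List.getD_eq_getElem _ _ hk
      have hn1 : 0 < qs.length := by omega
      apply h2
      refine List.any_eq_true.mpr ⟨(((0 : Nat) : Int), qs.getD 0 0), ?_, ?_⟩
      · exact List.mem_map.mpr ⟨0, List.mem_range.mpr hn1, rfl⟩
      · refine List.any_eq_true.mpr ⟨0, ?_, ?_⟩
        · rw [PySem.List.mem_pyRange_one]
          constructor
          · omega
          · exact_mod_cast hn1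
        · simp only [Bool.or_eq_true]
          left; left; left
          refine (pv_contains_qpos qs _).mpr ⟨k, hk, ?_⟩
          have hL : pvGetPos ((qs.length : Int)) ((k : Int)) (qs.getD k 0 - 1) = -1 := by
            unfold pvGetPos
            rw [if_neg]
            intro hcon2
            obtain ⟨-, -, h3, h4⟩ := hcon2
            rw [hg] at h3 h4
            have h5 := hbad (by omega)
            omega
          have hR : pvGetPos ((qs.length : Int)) (((0 : Nat) : Int) - 0 - 1)
              (qs.getD 0 0 - 1 - 0 - 1) = -1 := by
            unfold pvGetPos
            rw [if_neg]
            intro hcon2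
            obtain ⟨h3, -, -, -⟩ := hcon2
            omega
          rw [hL, hR]
    refine ⟨hnodup, hP2, ?_⟩
    intro i j hij hj
    have hi : i < qs.length := lt_trans hij hj
    intro habs
    apply h2
    refine List.any_eq_true.mpr ⟨((i : Int), qs.getD i 0), ?_, ?_⟩
    · exact List.mem_map.mpr ⟨i, List.mem_range.mpr hi, rfl⟩
    · refine List.any_eq_true.mpr ⟨((j - i - 1 : Nat) : Int), ?_, ?_⟩
      · rw [PySem.List.mem_pyRange_one]
        omega
      · simp only [Bool.or_eq_true]
        by_cases hs : qs.getD i 0 ≤ qs.getD j 0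
        · -- queen j is on the down diagonal: cell (cr, rd)
          right
          refine (pv_contains_qpos qs _).mpr ⟨j, hj, ?_⟩
          have e1 : ((i : Int) + ((j - i - 1 : Nat) : Int) + 1) = (j : Int) := by omega
          have e2 : (qs.getD i 0 - 1 + ((j - i - 1 : Nat) : Int) + 1) = qs.getD j 0 - 1 := by
            omega
          rw [e1, e2]
        · -- queen j is on the up diagonal: cell (cr, ru)
          left; right
          refine (pv_contains_qpos qs _).mpr ⟨j, hj, ?_⟩
          have e1 : ((i : Int) + ((j - i - 1 : Nat) : Int) + 1) = (j : Int) := by omega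
          have e2 : (qs.getD i 0 - 1 - ((j - i - 1 : Nat) : Int) - 1) = qs.getD j 0 - 1 := by
            omega
          rw [e1, e2]

theorem pv_check_eq (qs : List Int) : pvQcheck qs = pvOk qs := by
  have h1 := pv_qcheck_iff qs
  have h2 := pv_ok_iff qs
  cases hA : pvQcheck qs <;> cases hB : pvOk qs <;> simp_all

-- ===== VERDICT (by name: the statement is the Claim_ definition above) =====
theorem qfix_spec : Claim_equal_qfix := by
  unfold Claim_equal_qfix Spec_qfix
  intro queens _
  unfold qfix qfix_alt
  simp only [pv_check_eq]
  by_cases h : pvOk queens = true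
  · simp [h]
  · simp only [h, Bool.false_eq_true, if_false]
    have houter :
        (PySem.List.enumerate queens).findSome? (fun p =>
          (PySem.List.pyRange (p.1 + 1) (queens.length : Int) 1).findSome? (fun j =>
            let q2 := queens.getD j.toNat 0
            let swapped := (queens.set p.1.toNat q2).set j.toNat p.2
            if pvOk swapped then some swapped else none)) =
        (List.range queens.length).findSome? (fun i =>
          (List.range' (i + 1) (queens.length - (i + 1))).findSome? (fun j =>
            let cand := (queens.set i (queens.getD j 0)).set j (queens.getD i 0)
            if pvOk cand then some cand else none)) := by
      rw [pv_enumerate_eq, List.findSome?_map]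
      apply pv_findSome?_congr
      intro i hi
      rw [List.mem_range] at hi
      have hr : PySem.List.pyRange (((i : Int)) + 1) ((queens.length : Int)) 1 =
          (List.range' (i + 1) (queens.length - (i + 1))).map (fun (j : Nat) => (j : Int)) := by
        have e1 : ((i : Int) + 1) = (((i + 1 : Nat)) : Int) := by push_cast; ring
        have e2 : ((queens.length : Int)) = ((((i + 1) + (queens.length - (i + 1)) : Nat)) : Int) := by
          omega
        rw [e1, e2, pv_range'_eq]
      dsimp only [Function.comp]
      rw [hr, List.findSome?_map]
      apply pv_findSome?_congr
      intro j hj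
      dsimp only [Function.comp]
      simp only [Int.toNat_natCast]
    rw [houter]
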